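-- pv_equiv track=rewrite | github.com/prajktamusale/Python | keypad.py | get_keypresses
-- ===== SOURCE A (Python) =====
-- keypad = {'1': '.,?!:',
--           '2': 'ABC',
--           '3' :'DEF',
--           '4':'GHI',
--           '5':'JKL',
--           '6':'MNO',
--           '7': 'PQRS',
--           '8':'TUV',
--           '9':'WXYZ',
--           '0':''}
--
-- def  get_keypresses(message):
--     result = []
--     message = message.upper()
--
--     for char in message:
--         for key, chars in keypad.items():
--             if char in chars:
--                 presses = chars.index(char) + 1
--                 result.append(key * presses)
--                 break
--     return''.join(result)
-- ===== SOURCE B (Python) =====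
-- def get_keypresses(message):
--     # Closed-form arithmetic: letters map to keys 2-9 by position in the
--     # alphabet (groups of 3, with 4-letter groups on 7 and 9); punctuation
--     # '.,?!:' maps to key 1 by its position. No keypad table is consulted.
--     out = []
--     for ch in message.upper():
--         o = ord(ch)
--         if 65 <= o <= 90:
--             i = o - 65
--             if i < 15:
--                 out.append(str(2 + i // 3) * (i % 3 + 1))
--             elif i < 19:
--                 out.append('7' * (i - 14))
--             elif i < 22:
--                 out.append('8' * (i - 18))
--             else:
--                 out.append('9' * (i - 21))
--         else:
--             p = '.,?!:'.find(ch)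
--             if p >= 0:
--                 out.append('1' * (p + 1))
--     return ''.join(out)
-- ===== Notes on version B (the rewrite author's own statement) =====
-- stated objective: alternative
-- what changed: B computes each character's key and press count by closed-form arithmetic on the character code (alphabet position divided into keypad groups, with the 4-letter groups on 7 and 9 handled by range tests) instead of scanning A's keypad table with substring search and .index per character; no keypad data structure exists in B.
import Mathlib
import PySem

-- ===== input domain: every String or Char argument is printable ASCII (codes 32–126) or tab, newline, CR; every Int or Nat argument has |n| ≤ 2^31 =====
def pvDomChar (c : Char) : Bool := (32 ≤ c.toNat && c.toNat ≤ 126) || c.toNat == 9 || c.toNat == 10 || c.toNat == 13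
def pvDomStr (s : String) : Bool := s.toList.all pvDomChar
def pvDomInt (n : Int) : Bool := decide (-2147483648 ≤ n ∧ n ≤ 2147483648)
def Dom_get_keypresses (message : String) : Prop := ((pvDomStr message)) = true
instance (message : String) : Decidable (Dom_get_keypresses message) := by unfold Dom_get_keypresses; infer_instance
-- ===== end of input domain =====

-- B derives each character's key and press count by closed-form arithmetic on the
-- character code (alphabet-position group tests), consulting no keypad table at all.


-- ===== PORT A =====
-- the module constant `keypad` (dict of 1-char keys to letter strings, insertion order)
def keypadItems : List (List Char × List Char) :=
  [("1".toList, ".,?!:".toList), ("2".toList, "ABC".toList), ("3".toList, "DEF".toList),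
   ("4".toList, "GHI".toList), ("5".toList, "JKL".toList), ("6".toList, "MNO".toList),
   ("7".toList, "PQRS".toList), ("8".toList, "TUV".toList), ("9".toList, "WXYZ".toList),
   ("0".toList, "".toList)]

-- A's inner `for key, chars in keypad.items(): if char in chars: … break` loop:
-- returns the appended chunk at the first match, none if the loop falls through.
def aInner (char : Char) : List (List Char × List Char) → Option (List Char)
  | [] => none
  | (key, chars) :: rest =>
    if PySem.Chars.isIn [char] chars then
      -- presses = chars.index(char) + 1; chunk = key * presses
      some (PySem.List.pyRepeat key (PySem.Chars.find chars [char] + 1))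
    else aInner char rest

def get_keypresses (message : String) : String :=
  let msg := PySem.Chars.upper message.toList
  let result := msg.foldl (fun result char =>
    match aInner char keypadItems with
    | some chunk => result ++ [chunk]
    | none => result) ([] : List (List Char))
  String.ofList (PySem.Chars.join [] result)

-- ===== PORT B =====
-- the body of B's loop: the appended chunk for one character, none if B skips it
def bChunk (ch : Char) : Option (List Char) :=
  let o : Int := (ch.toNat : Int)                               -- o = ord(ch)
  if 65 ≤ o ∧ o ≤ 90 then
    let i := o - 65
    if i < 15 then
      some (PySem.List.pyRepeat (PySem.Int.toChars (2 + PySem.Int.floordiv i 3))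
        (PySem.Int.mod i 3 + 1))                                -- str(2 + i//3) * (i%3 + 1)
    else if i < 19 then some (PySem.List.pyRepeat ['7'] (i - 14))
    else if i < 22 then some (PySem.List.pyRepeat ['8'] (i - 18))
    else some (PySem.List.pyRepeat ['9'] (i - 21))
  else
    let p := PySem.Chars.find ".,?!:".toList [ch]               -- '.,?!:'.find(ch)
    if 0 ≤ p then some (PySem.List.pyRepeat ['1'] (p + 1)) else none

def get_keypresses_alt (message : String) : String :=
  let out := (PySem.Chars.upper message.toList).foldl (fun out ch =>
    match bChunk ch with
    | some chunk => out ++ [chunk]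
    | none => out) ([] : List (List Char))
  String.ofList (PySem.Chars.join [] out)

-- ===== PRECONDITION & SPEC =====
def Spec_get_keypresses (message : String) (out : String) : Prop := out = get_keypresses_alt message
instance (message : String) (out : String) : Decidable (Spec_get_keypresses message out) := by unfold Spec_get_keypresses; infer_instance

-- ===== CLAIM =====
def Claim_equal_get_keypresses : Prop := ∀ (message : String), Dom_get_keypresses message → Spec_get_keypresses message (get_keypresses message)

-- ===== LEMMAS AND PROOFS =====

-- an append-only accumulator loop is the filterMap of its per-element option
theorem fold_eq_filterMap (f : Char → Option (List Char)) (cs : List Char)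
    (acc : List (List Char)) :
    cs.foldl (fun result char =>
      match f char with
      | some chunk => result ++ [chunk]
      | none => result) acc
      = acc ++ cs.filterMap f := by
  induction cs generalizing acc with
  | nil => simp
  | cons c cs ih =>
    simp only [List.foldl_cons, List.filterMap_cons]
    cases h : f c <;> simp [ih]

-- the two per-character computations agree on every character code below 127
set_option maxRecDepth 8192 in
theorem perChar_lt : ∀ n : Fin 127,
    aInner (Char.ofNat n.val) keypadItems = bChunk (Char.ofNat n.val) := by
  decide

theorem perChar (c : Char) (h : c.toNat < 127) :
    aInner c keypadItems = bChunk c := by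
  have := perChar_lt ⟨c.toNat, h⟩
  rwa [Char.ofNat_toNat] at this

theorem dom_upper_lt (c : Char) (h : pvDomChar c = true) :
    (PySem.Chars.upperChar c).toNat < 127 := by
  have hc : c.toNat < 127 := by
    simp only [pvDomChar, Bool.or_eq_true, Bool.and_eq_true, decide_eq_true_eq,
      beq_iff_eq] at h
    omega
  simp only [PySem.Chars.upperChar]
  split
  · have hv : Char.isValidCharNat (c.toNat - 32) := Or.inl (by omega)
    simpa [Char.ofNat, hv] using by omega
  · exact hc

-- ===== VERDICT =====
theorem get_keypresses_spec : Claim_equal_get_keypresses := by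
  intro message hdom
  unfold Spec_get_keypresses get_keypresses get_keypresses_alt
  simp only [fold_eq_filterMap, List.nil_append]
  congr 1
  apply congrArg
  apply List.filterMap_congr
  intro c hc
  simp only [PySem.Chars.upper, List.mem_map] at hc
  obtain ⟨c0, hc0, rfl⟩ := hc
  have hd : pvDomChar c0 = true := by
    have := hdom
    simp only [Dom_get_keypresses, pvDomStr, List.all_eq_true] at this
    exact this c0 hc0
  exact perChar _ (dom_upper_lt c0 hd)
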